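-- pv_equiv track=rewrite | github.com/ChahelPaatur/Self-Modifying-Program-Synthesis-via-Online-Library-Evolution | aero_synth_benchmark.py | translate_grid
-- ===== SOURCE A (Python) =====
-- from typing import Any, Dict, List, Tuple
--
-- def zeros(h: int, w: int) -> List[List[int]]:
--     return [[0] * w for _ in range(h)]
--
-- def translate_grid(grid: List[List[int]], dr: int, dc: int) -> List[List[int]]:
--     H, W = len(grid), len(grid[0])
--     out = zeros(H, W)
--     for i in range(H):
--         for j in range(W):
--             v = grid[i][j]
--             if v == 0:
--                 continue
--             ni, nj = i + dr, j + dc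
--             if 0 <= ni < H and 0 <= nj < W:
--                 out[ni][nj] = v
--     return out
-- ===== SOURCE B (Python) =====
-- from typing import List
--
-- def translate_grid(grid: List[List[int]], dr: int, dc: int) -> List[List[int]]:
--     # Gather/pull: each output cell reads its unique source cell directly.
--     H, W = len(grid), len(grid[0])
--     return [
--         [grid[ni - dr][nj - dc]
--          if 0 <= ni - dr < H and 0 <= nj - dc < W else 0
--          for nj in range(W)]
--         for ni in range(H)
--     ]
-- ===== Notes on version B (the rewrite author's own statement) =====
-- stated objective: alternative
-- what changed: B builds the output grid by a gather/pull comprehension reading each output cell's unique source cell (ni-dr, nj-dc) directly, instead of A's scatter: allocating a zero grid and writing each nonzero source cell at its translated target.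
import Mathlib
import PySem

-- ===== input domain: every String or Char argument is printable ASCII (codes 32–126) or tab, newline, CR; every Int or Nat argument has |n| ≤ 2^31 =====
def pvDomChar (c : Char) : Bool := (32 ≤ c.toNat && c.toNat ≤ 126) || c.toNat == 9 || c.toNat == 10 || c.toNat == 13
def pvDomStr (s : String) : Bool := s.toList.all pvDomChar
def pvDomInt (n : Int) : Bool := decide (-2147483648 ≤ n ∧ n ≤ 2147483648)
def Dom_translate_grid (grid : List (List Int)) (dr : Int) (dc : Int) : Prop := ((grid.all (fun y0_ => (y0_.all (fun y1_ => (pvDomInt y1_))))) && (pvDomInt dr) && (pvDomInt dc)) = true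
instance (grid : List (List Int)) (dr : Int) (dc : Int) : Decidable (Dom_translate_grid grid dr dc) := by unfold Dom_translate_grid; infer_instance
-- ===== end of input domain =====

-- B replaces A's scatter loop (zero grid, then write each nonzero source cell at its target)
-- by a gather/pull comprehension: each output cell reads its unique source cell directly (alternative decomposition, same cost).

-- ===== PORT A =====
def zeros (h : Int) (w : Int) : List (List Int) :=
  (List.range h.toNat).map (fun _ => List.replicate w.toNat (0 : Int))

def translate_grid (grid : List (List Int)) (dr : Int) (dc : Int) : List (List Int) :=
  let H : Int := grid.length
  let W : Int := (PySem.List.pyGetD grid 0 []).length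
  (PySem.List.pyRange 0 H 1).foldl (fun out i =>
    (PySem.List.pyRange 0 W 1).foldl (fun out j =>
      let v := PySem.List.pyGetD (PySem.List.pyGetD grid i []) j 0
      if v = 0 then out
      else
        let ni := i + dr
        let nj := j + dc
        if 0 ≤ ni ∧ ni < H ∧ 0 ≤ nj ∧ nj < W then
          PySem.List.pySetD out ni
            (PySem.List.pySetD (PySem.List.pyGetD out ni []) nj v)
        else out) out) (zeros H W)

-- ===== PORT B =====
def translate_grid_alt (grid : List (List Int)) (dr : Int) (dc : Int) : List (List Int) :=
  let H : Int := grid.length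
  let W : Int := (PySem.List.pyGetD grid 0 []).length
  (PySem.List.pyRange 0 H 1).map (fun ni =>
    (PySem.List.pyRange 0 W 1).map (fun nj =>
      if 0 ≤ ni - dr ∧ ni - dr < H ∧ 0 ≤ nj - dc ∧ nj - dc < W then
        PySem.List.pyGetD (PySem.List.pyGetD grid (ni - dr) []) (nj - dc) 0
      else 0))

-- ===== PRECONDITION & SPEC =====
-- Pre_ excludes exactly the inputs on which the Python A raises IndexError:
-- the empty grid (grid[0]) and grids with some row shorter than the first row (reading grid[i][j] for j < W).
def Pre_translate_grid (grid : List (List Int)) (dr : Int) (dc : Int) : Prop :=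
  grid ≠ [] ∧ ∀ row ∈ grid, (PySem.List.pyGetD grid 0 []).length ≤ row.length
instance (grid : List (List Int)) (dr : Int) (dc : Int) : Decidable (Pre_translate_grid grid dr dc) := by unfold Pre_translate_grid; infer_instance

def pvWitness_translate_grid : List (List Int) × Int × Int := ([[1, 0], [0, 2]], 1, 1)

def Spec_translate_grid (grid : List (List Int)) (dr : Int) (dc : Int) (out : List (List Int)) : Prop := out = translate_grid_alt grid dr dc
instance (grid : List (List Int)) (dr : Int) (dc : Int) (out : List (List Int)) : Decidable (Spec_translate_grid grid dr dc out) := by unfold Spec_translate_grid; infer_instance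

-- ===== CLAIM (what is proved, stated in full; the proofs are below) =====
def Claim_equal_translate_grid : Prop := ∀ (grid : List (List Int)) (dr : Int) (dc : Int), Dom_translate_grid grid dr dc → Pre_translate_grid grid dr dc → Spec_translate_grid grid dr dc (translate_grid grid dr dc)

-- ===== LEMMAS AND PROOFS =====

def pvMk (n w : Nat) (f : Nat → Nat → Int) : List (List Int) :=
  (List.range n).map (fun a => (List.range w).map (fun b => f a b))

def pvF (grid : List (List Int)) (dr dc : Int) (w : Nat) (m : Nat) (a b : Nat) : Int :=
  if 0 ≤ (a : Int) - dr ∧ (a : Int) - dr < (m : Int) ∧ 0 ≤ (b : Int) - dc ∧ (b : Int) - dc < (w : Int) then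
    PySem.List.pyGetD (PySem.List.pyGetD grid ((a : Int) - dr) []) ((b : Int) - dc) 0
  else 0

lemma pvSetMapRange {α : Type} (n t : Nat) (f : Nat → α) (v : α) :
    ((List.range n).map f).set t v = (List.range n).map (fun a => if a = t then v else f a) := by
  apply List.ext_getElem
  · simp
  · intro i h1 h2
    simp only [List.getElem_set, List.getElem_map, List.getElem_range]
    split_ifs with ha hb hb <;> first | rfl | omega

lemma pvMk_congr (n w : Nat) (f f' : Nat → Nat → Int)
    (h : ∀ a, a < n → ∀ b, b < w → f a b = f' a b) : pvMk n w f = pvMk n w f' := by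
  unfold pvMk
  apply List.map_congr_left
  intro a ha
  rw [List.mem_range] at ha
  apply List.map_congr_left
  intro b hb
  rw [List.mem_range] at hb
  exact h a ha b hb

lemma pvMk_get (n w : Nat) (f : Nat → Nat → Int) {i : Int} (h0 : 0 ≤ i) (h1 : i < (n : Int)) :
    PySem.List.pyGetD (pvMk n w f) i [] = (List.range w).map (fun b => f i.toNat b) := by
  rw [PySem.List.pyGetD_eq_getElem _ _ h0 (by simp [pvMk]; omega)]
  simp [pvMk]

lemma pvMk_set (n w : Nat) (f : Nat → Nat → Int) {i j : Int} (v : Int)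
    (h0 : 0 ≤ i) (h1 : i < (n : Int)) (h2 : 0 ≤ j) :
    PySem.List.pySetD (pvMk n w f) i
      (PySem.List.pySetD (PySem.List.pyGetD (pvMk n w f) i []) j v)
    = pvMk n w (fun a b => if a = i.toNat ∧ b = j.toNat then v else f a b) := by
  rw [pvMk_get n w f h0 h1, PySem.List.pySetD_of_nonneg _ _ h2, PySem.List.pySetD_of_nonneg _ _ h0,
      pvSetMapRange]
  show ((List.range n).map (fun a => (List.range w).map (fun b => f a b))).set i.toNat _ = _
  rw [pvSetMapRange]
  apply List.map_congr_left
  intro a ha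
  by_cases hai : a = i.toNat
  · subst hai
    rw [if_pos rfl]
    apply List.map_congr_left
    intro b hb
    by_cases hbj : b = j.toNat <;> simp [hbj]
  · rw [if_neg hai]
    apply List.map_congr_left
    intro b hb
    simp [hai]

lemma pvFoldlFixed {α β : Type} (l : List β) (f : α → β → α) (init : α)
    (h : ∀ acc x, f acc x = acc) : l.foldl f init = init := by
  induction l generalizing init with
  | nil => rfl
  | cons x xs ih => simp [List.foldl_cons, h, ih]

lemma pvInner (grid : List (List Int)) (dr dc : Int) (n w : Nat)
    (f : Nat → Nat → Int) (i : Int)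
    (ht0 : 0 ≤ i + dr) (ht1 : i + dr < (n : Int))
    (hz : ∀ b, f (i + dr).toNat b = 0) :
    ∀ m, m ≤ w →
    (List.range m).foldl (fun out (j' : Nat) =>
      if PySem.List.pyGetD (PySem.List.pyGetD grid i []) (j' : Int) 0 = 0 then out
      else
        if 0 ≤ i + dr ∧ i + dr < (n : Int) ∧ 0 ≤ (j' : Int) + dc ∧ (j' : Int) + dc < (w : Int) then
          PySem.List.pySetD out (i + dr)
            (PySem.List.pySetD (PySem.List.pyGetD out (i + dr) []) ((j' : Int) + dc)
              (PySem.List.pyGetD (PySem.List.pyGetD grid i []) (j' : Int) 0))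
        else out) (pvMk n w f)
    = pvMk n w (fun a b =>
        if a = (i + dr).toNat ∧ 0 ≤ (b : Int) - dc ∧ (b : Int) - dc < (m : Int) then
          PySem.List.pyGetD (PySem.List.pyGetD grid i []) ((b : Int) - dc) 0
        else f a b) := by
  intro m
  induction m with
  | zero =>
    intro _
    rw [List.range_zero, List.foldl_nil]
    apply pvMk_congr
    intro a ha b hb
    rw [if_neg]
    omega
  | succ m ih =>
    intro hm
    rw [List.range_succ, List.foldl_append, ih (by omega), List.foldl_cons, List.foldl_nil]

    by_cases hv : PySem.List.pyGetD (PySem.List.pyGetD grid i []) (m : Int) 0 = 0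
    · rw [if_pos hv]
      apply pvMk_congr
      intro a ha b hb
      by_cases h1 : a = (i + dr).toNat ∧ 0 ≤ (b : Int) - dc ∧ (b : Int) - dc < (m : Int)
      · rw [if_pos h1, if_pos ⟨h1.1, h1.2.1, by push_cast; omega⟩]
      · rw [if_neg h1]
        by_cases h2 : a = (i + dr).toNat ∧ 0 ≤ (b : Int) - dc ∧ (b : Int) - dc < ((m + 1 : Nat) : Int)
        · obtain ⟨h2a, h2b, h2c⟩ := h2
          have hbm : (b : Int) - dc = (m : Int) := by push_cast at h2c; omega
          rw [if_pos ⟨h2a, h2b, h2c⟩, hbm, hv, h2a]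
          exact hz b
        · rw [if_neg h2]
    · rw [if_neg hv]
      by_cases hg : 0 ≤ i + dr ∧ i + dr < (n : Int) ∧ 0 ≤ (m : Int) + dc ∧ (m : Int) + dc < (w : Int)
      · rw [if_pos hg, pvMk_set n w _ _ ht0 ht1 hg.2.2.1]
        apply pvMk_congr
        intro a ha b hb
        have hmd : 0 ≤ (m : Int) + dc := hg.2.2.1
        by_cases hw : a = (i + dr).toNat ∧ b = ((m : Int) + dc).toNat
        · obtain ⟨hw1, hw2⟩ := hw
          have hbm : (b : Int) - dc = (m : Int) := by omega
          rw [if_pos ⟨hw1, hw2⟩,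
              if_pos (show a = (i + dr).toNat ∧ 0 ≤ (b : Int) - dc ∧ (b : Int) - dc < ((m + 1 : Nat) : Int) from
                ⟨hw1, by omega, by push_cast; omega⟩), hbm]
        · rw [if_neg hw]
          by_cases hc : a = (i + dr).toNat ∧ 0 ≤ (b : Int) - dc ∧ (b : Int) - dc < (m : Int)
          · rw [if_pos hc, if_pos ⟨hc.1, hc.2.1, by push_cast; omega⟩]
          · rw [if_neg hc, if_neg (by
              rintro ⟨ha2, hb2, hb3⟩
              push_cast at hb3
              exact absurd (show a = (i + dr).toNat ∧ b = ((m : Int) + dc).toNat from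
                ⟨ha2, by omega⟩) hw)]
      · rw [if_neg hg]
        apply pvMk_congr
        intro a ha b hb
        by_cases hc : a = (i + dr).toNat ∧ 0 ≤ (b : Int) - dc ∧ (b : Int) - dc < (m : Int)
        · rw [if_pos hc, if_pos ⟨hc.1, hc.2.1, by push_cast; omega⟩]
        · rw [if_neg hc, if_neg (by
            rintro ⟨ha2, hb2, hb3⟩
            push_cast at hb3
            by_cases hbm : (b : Int) - dc < (m : Int)
            · exact hc ⟨ha2, hb2, hbm⟩
            · exact hg ⟨ht0, ht1, by omega, by omega⟩)]

lemma pvOuter (grid : List (List Int)) (dr dc : Int) (n w : Nat) :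
    ∀ m, m ≤ n →
    (List.range m).foldl (fun out (i' : Nat) =>
      (List.range w).foldl (fun out (j' : Nat) =>
        if PySem.List.pyGetD (PySem.List.pyGetD grid (i' : Int) []) (j' : Int) 0 = 0 then out
        else
          if 0 ≤ (i' : Int) + dr ∧ (i' : Int) + dr < (n : Int) ∧ 0 ≤ (j' : Int) + dc ∧ (j' : Int) + dc < (w : Int) then
            PySem.List.pySetD out ((i' : Int) + dr)
              (PySem.List.pySetD (PySem.List.pyGetD out ((i' : Int) + dr) []) ((j' : Int) + dc)
                (PySem.List.pyGetD (PySem.List.pyGetD grid (i' : Int) []) (j' : Int) 0))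
          else out) out) (pvMk n w (fun _ _ => 0))
    = pvMk n w (pvF grid dr dc w m) := by
  intro m
  induction m with
  | zero =>
    intro _
    rw [List.range_zero, List.foldl_nil]
    apply pvMk_congr
    intro a ha b hb
    rw [pvF, if_neg]
    omega
  | succ m ih =>
    intro hm
    rw [List.range_succ, List.foldl_append, ih (by omega), List.foldl_cons, List.foldl_nil]
    by_cases ht : 0 ≤ (m : Int) + dr ∧ (m : Int) + dr < (n : Int)
    · rw [pvInner grid dr dc n w (pvF grid dr dc w m) (m : Int) ht.1 ht.2
        (by intro b; rw [pvF, if_neg]; omega) w (le_refl w)]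
      apply pvMk_congr
      intro a ha b hb
      simp only [pvF]
      by_cases hc : a = ((m : Int) + dr).toNat ∧ 0 ≤ (b : Int) - dc ∧ (b : Int) - dc < (w : Int)
      · obtain ⟨hc1, hc2, hc3⟩ := hc
        have hae : (a : Int) - dr = (m : Int) := by omega
        rw [if_pos ⟨hc1, hc2, hc3⟩,
            if_pos (show 0 ≤ (a : Int) - dr ∧ (a : Int) - dr < ((m + 1 : Nat) : Int) ∧
                0 ≤ (b : Int) - dc ∧ (b : Int) - dc < (w : Int) from
              ⟨by omega, by push_cast; omega, hc2, hc3⟩), hae]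
      · rw [if_neg hc]
        by_cases hc1 : 0 ≤ (a : Int) - dr ∧ (a : Int) - dr < (m : Int) ∧ 0 ≤ (b : Int) - dc ∧ (b : Int) - dc < (w : Int)
        · rw [if_pos hc1, if_pos ⟨hc1.1, by push_cast; omega, hc1.2.2⟩]
        · rw [if_neg hc1, if_neg (by
            rintro ⟨h1, h2, h3, h4⟩
            push_cast at h2
            by_cases ham : (a : Int) - dr < (m : Int)
            · exact hc1 ⟨h1, ham, h3, h4⟩
            · exact hc ⟨by omega, h3, h4⟩)]
    · rw [pvFoldlFixed _ _ _ (by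
        intro acc j'
        by_cases hv : PySem.List.pyGetD (PySem.List.pyGetD grid (m : Int) []) (j' : Int) 0 = 0
        · rw [if_pos hv]
        · rw [if_neg hv, if_neg (by rintro ⟨hg1, hg2, _⟩; exact ht ⟨hg1, hg2⟩)])]
      apply pvMk_congr
      intro a ha b hb
      rw [pvF, pvF]
      by_cases hc1 : 0 ≤ (a : Int) - dr ∧ (a : Int) - dr < (m : Int) ∧ 0 ≤ (b : Int) - dc ∧ (b : Int) - dc < (w : Int)
      · rw [if_pos hc1, if_pos ⟨hc1.1, by push_cast; omega, hc1.2.2.1, hc1.2.2.2⟩]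
      · rw [if_neg hc1, if_neg (by
          rintro ⟨h1, h2, h3, h4⟩
          push_cast at h2
          by_cases ham : (a : Int) - dr < (m : Int)
          · exact hc1 ⟨h1, ham, h3, h4⟩
          · exact ht ⟨by omega, by omega⟩)]

lemma pvA_eq (grid : List (List Int)) (dr dc : Int) :
    translate_grid grid dr dc = pvMk grid.length (PySem.List.pyGetD grid 0 []).length
      (pvF grid dr dc (PySem.List.pyGetD grid 0 []).length grid.length) := by
  have hz : zeros (grid.length : Int) ((PySem.List.pyGetD grid 0 []).length : Int)
      = pvMk grid.length (PySem.List.pyGetD grid 0 []).length (fun _ _ => 0) := by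
    unfold zeros pvMk
    simp [List.map_const']
  simp only [translate_grid, hz, PySem.List.pyRange_zero_natCast, List.foldl_map]
  exact pvOuter grid dr dc grid.length (PySem.List.pyGetD grid 0 []).length grid.length (le_refl _)

lemma pvB_eq (grid : List (List Int)) (dr dc : Int) :
    translate_grid_alt grid dr dc = pvMk grid.length (PySem.List.pyGetD grid 0 []).length
      (pvF grid dr dc (PySem.List.pyGetD grid 0 []).length grid.length) := by
  simp only [translate_grid_alt, pvMk, PySem.List.pyRange_zero_natCast, List.map_map]
  apply List.map_congr_left
  intro a _
  apply List.map_congr_left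
  intro b _
  rw [Function.comp_apply, pvF]

-- ===== VERDICT (by name: the statement is the Claim_ definition above) =====
theorem translate_grid_spec : Claim_equal_translate_grid := by
  intro grid dr dc _ _
  unfold Spec_translate_grid
  rw [pvA_eq, pvB_eq]
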